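-- pv_equiv track=rewrite | github.com/thealper2/codewars-solutions | 6-kyu/acronym_buster.py | acronym_buster
-- ===== SOURCE A (Python) =====
-- def acronym_buster(text):
--     acronyms = {
--         'KPI': "key performance indicators",
--         'EOD': "the end of the day",
--         'TBD': "to be decided",
--         'WAH': "work at home",
--         'IAM': "in a meeting",
--         'OOO': "out of office",
--         'NRN': "no reply necessary",
--         'CTA': "call to action",
--         'SWOT': "strengths, weaknesses, opportunities and threats"
--     }
--
--     words = []
--     current_word = ""
--     for char in text:
--         if char.isalnum():
--             current_word += char
--         else:
--             if current_word:
--                 words.append(current_word)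
--                 current_word = ""
--             words.append(char)
--     if current_word:
--         words.append(current_word)
--
--     for i, word in enumerate(words):
--         if len(word) >= 3 and word.isupper() and word.isalpha():
--             if word not in acronyms:
--                 return f'{word} is an acronym. I do not like acronyms. Please remove them from your email.'
--
--     result_words = []
--     for word in words:
--         if len(word) >= 3 and word.isupper() and word.isalpha() and word in acronyms:
--             result_words.append(acronyms[word])
--         else:
--             result_words.append(word)
--
--     result = "".join(result_words)
--     sentences = result.split('. ')
--     capitalized_sentences = []
--     for sentence in sentences:
--         if sentence:
--             first_alpha_index = None
--             for i, char in enumerate(sentence):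
--                 if char.isalpha():
--                     first_alpha_index = i
--                     break
--
--             if first_alpha_index is not None:
--                 capitalized = (sentence[:first_alpha_index] +
--                              sentence[first_alpha_index].upper() +
--                              sentence[first_alpha_index + 1:])
--                 capitalized_sentences.append(capitalized)
--             else:
--                 capitalized_sentences.append(sentence)
--         else:
--             capitalized_sentences.append('')
--
--     result = '. '.join(capitalized_sentences)
--     return result
-- ===== SOURCE B (Python) =====
-- # B: single-pass streaming rewrite: no token list, no split/join passes --
-- # words are flushed inline (complaint returned immediately, in the same order),
-- # and sentence recapitalization is done by a boundary flag (period then blank)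
-- # carried on the output stream.
-- _ACRONYMS = {
--     'KPI': "key performance indicators",
--     'EOD': "the end of the day",
--     'TBD': "to be decided",
--     'WAH': "work at home",
--     'IAM': "in a meeting",
--     'OOO': "out of office",
--     'NRN': "no reply necessary",
--     'CTA': "call to action",
--     'SWOT': "strengths, weaknesses, opportunities and threats"
-- }
--
--
-- def acronym_buster(text):
--     out = []          # output characters
--     cap = True        # capitalize the next alphabetic character emitted
--     last = ''         # last character emitted
--     word = []         # current run of alphanumeric characters
--
--     def emit(chunk):
--         nonlocal cap, last
--         for ch in chunk:
--             if last == '.' and ch == ' ':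
--                 cap = True
--             if cap and ch.isalpha():
--                 out.append(ch.upper())
--                 cap = False
--             else:
--                 out.append(ch)
--             last = ch
--
--     def flush():
--         # emits the pending word (expanded if it is a known acronym);
--         # returns the complaint string for an unknown acronym, else None
--         nonlocal word
--         if word:
--             w = ''.join(word)
--             if len(w) >= 3 and w.isupper() and w.isalpha():
--                 if w in _ACRONYMS:
--                     emit(_ACRONYMS[w])
--                 else:
--                     return f'{w} is an acronym. I do not like acronyms. Please remove them from your email.'
--             else:
--                 emit(w)
--             word = []
--         return None
--
--     for ch in text:
--         if ch.isalnum():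
--             word.append(ch)
--         else:
--             complaint = flush()
--             if complaint is not None:
--                 return complaint
--             emit(ch)
--     complaint = flush()
--     if complaint is not None:
--         return complaint
--     return ''.join(out)
-- ===== Notes on version B (the rewrite author's own statement) =====
-- stated objective: alternative
-- what changed: A's five phases (tokenize into an interleaved word/separator list, scan it for unknown acronyms, map replacements, join, then split on '. ' / recapitalize / re-join) are fused into one streaming pass that flushes each alphanumeric run inline (complaining immediately on an unknown acronym) and recapitalizes via a sentence-boundary flag (period then blank) carried on the output stream, with no token list and no split/join.
import Mathlib
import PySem

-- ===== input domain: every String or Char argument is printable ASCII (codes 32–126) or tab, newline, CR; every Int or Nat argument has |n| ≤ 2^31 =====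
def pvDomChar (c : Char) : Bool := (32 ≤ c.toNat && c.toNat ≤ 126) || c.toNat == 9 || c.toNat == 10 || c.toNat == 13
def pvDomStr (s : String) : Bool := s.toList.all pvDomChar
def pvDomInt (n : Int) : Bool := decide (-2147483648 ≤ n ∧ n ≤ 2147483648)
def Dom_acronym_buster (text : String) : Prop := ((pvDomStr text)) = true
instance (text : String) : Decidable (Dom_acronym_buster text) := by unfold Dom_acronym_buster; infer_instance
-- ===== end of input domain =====

-- B is a single-pass streaming rewrite of A (no token list, no split/join passes); equal return value proved below.

-- shared helpers (the acronym table and the eligibility test are identical in both Pythons)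
def pvAcronyms : PySem.Dict (List Char) (List Char) :=
  ((((((((PySem.Dict.empty.insert "KPI".toList "key performance indicators".toList).insert
     "EOD".toList "the end of the day".toList).insert
     "TBD".toList "to be decided".toList).insert
     "WAH".toList "work at home".toList).insert
     "IAM".toList "in a meeting".toList).insert
     "OOO".toList "out of office".toList).insert
     "NRN".toList "no reply necessary".toList).insert
     "CTA".toList "call to action".toList).insert
     "SWOT".toList "strengths, weaknesses, opportunities and threats".toList

-- hand port of Python str.isupper (at least one cased char, no lowercase cased char): exact on ASCII
def pvStrIsupper (cs : List Char) : Bool :=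
  cs.any (fun c => PySem.Chars.isupper c || PySem.Chars.islower c) &&
  cs.all (fun c => !PySem.Chars.islower c)

-- 'len(word) >= 3 and word.isupper() and word.isalpha()'
def pvElig (w : List Char) : Bool :=
  decide (3 ≤ w.length) && pvStrIsupper w && PySem.Chars.strIsalpha w

def pvComplaint (w : List Char) : List Char :=
  w ++ (" is an acronym. I do not like acronyms. Please remove them from your email.").toList

-- ===== PORT A =====
-- A's tokenizer loop: state (words, current_word)
def pvTok : List Char → List (List Char) → List Char → List (List Char)
  | [], words, cur => if cur ≠ [] then words ++ [cur] else words
  | c :: cs, words, cur =>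
      if PySem.Chars.isalnum c then pvTok cs words (cur ++ [c])
      else pvTok cs ((if cur ≠ [] then words ++ [cur] else words) ++ [[c]]) []

-- A's 'for i, word in enumerate(words)' complaint scan
def pvCheck : List (Int × List Char) → Option (List Char)
  | [] => none
  | (_, w) :: rest =>
      if pvElig w then
        if pvAcronyms.contains w then pvCheck rest else some (pvComplaint w)
      else pvCheck rest

-- A's 'for i, char in enumerate(sentence): if char.isalpha(): ...; break'
def pvFirstAlpha : List (Int × Char) → Option Int
  | [] => none
  | (i, c) :: rest => if PySem.Chars.isalpha c then some i else pvFirstAlpha rest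

-- A's per-sentence recapitalization: sentence[:i] + sentence[i].upper() + sentence[i+1:]
def pvCapSent (s : List Char) : List Char :=
  if s ≠ [] then
    match pvFirstAlpha (PySem.List.enumerate s) with
    | some i =>
        PySem.List.slice s none (some i) ++
        (match PySem.List.pyGet? s i with
         | some c => [PySem.Chars.upperChar c]
         | none => []) ++   -- unreachable: pvFirstAlpha yields an in-range index
        PySem.List.slice s (some (i + 1)) none
    | none => s
  else []

def pvA (cs : List Char) : List Char :=
  match pvCheck (PySem.List.enumerate (pvTok cs [] [])) with
  | some comp => comp
  | none =>
      PySem.Chars.join ". ".toList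
        ((PySem.Chars.splitOn
            (PySem.Chars.join []
              ((pvTok cs [] []).map (fun w =>
                if pvElig w && pvAcronyms.contains w then pvAcronyms.getD w [] else w)))
            ". ".toList).map pvCapSent)

def acronym_buster (text : String) : String := String.ofList (pvA text.toList)

-- ===== PORT B =====
-- streaming emitter: state (out, cap, last); a period followed by a blank on the output stream re-arms cap
def pvEmit : (List Char × Bool × Option Char) → List Char → (List Char × Bool × Option Char)
  | st, [] => st
  | (out, cap, last), c :: cs =>
      let cap : Bool := if last = some '.' ∧ c = ' ' then true else cap
      if cap && PySem.Chars.isalpha c then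
        pvEmit (out ++ [PySem.Chars.upperChar c], false, some c) cs
      else pvEmit (out ++ [c], cap, some c) cs

-- B's flush(): emits the pending word (expanded); complaint for an unknown acronym
def pvFlush (st : List Char × Bool × Option Char) (word : List Char) :
    (List Char) ⊕ (List Char × Bool × Option Char) :=
  if word ≠ [] then
    if pvElig word then
      if pvAcronyms.contains word then Sum.inr (pvEmit st (pvAcronyms.getD word []))
      else Sum.inl (pvComplaint word)
    else Sum.inr (pvEmit st word)
  else Sum.inr st

-- B's single main loop over the characters
def pvB : (List Char × Bool × Option Char) → List Char → List Char → List Char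
  | st, word, [] =>
      (match pvFlush st word with
       | Sum.inl comp => comp
       | Sum.inr st' => st'.1)
  | st, word, c :: cs =>
      if PySem.Chars.isalnum c then pvB st (word ++ [c]) cs
      else
        match pvFlush st word with
        | Sum.inl comp => comp
        | Sum.inr st' => pvB (pvEmit st' [c]) [] cs

def acronym_buster_alt (text : String) : String :=
  String.ofList (pvB ([], true, none) [] text.toList)

-- ===== PRECONDITION & SPEC =====
def Spec_acronym_buster (text : String) (out : String) : Prop := out = acronym_buster_alt text
instance (text : String) (out : String) : Decidable (Spec_acronym_buster text out) := by unfold Spec_acronym_buster; infer_instance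

-- ===== CLAIM (what is proved, stated in full; the proofs are below) =====
def Claim_equal_acronym_buster : Prop := ∀ (text : String), Dom_acronym_buster text → Spec_acronym_buster text (acronym_buster text)

-- ===== LEMMAS AND PROOFS =====

-- recapitalization, reference form
def pvCapF : List Char → List Char
  | [] => []
  | c :: cs => if PySem.Chars.isalpha c then PySem.Chars.upperChar c :: cs else c :: pvCapF cs

-- replacement applied to one token
def pvRepl (w : List Char) : List Char :=
  if pvElig w && pvAcronyms.contains w then pvAcronyms.getD w [] else w

-- the complaint scan without the (unused) enumerate index
def pvCheck' : List (List Char) → Option (List Char)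
  | [] => none
  | w :: rest =>
      if pvElig w then
        if pvAcronyms.contains w then pvCheck' rest else some (pvComplaint w)
      else pvCheck' rest

-- 'no capitalization boundary fires' while streaming s after having last emitted p
def pvOk : Option Char → List Char → Prop
  | _, [] => True
  | p, c :: cs => ¬(p = some '.' ∧ c = ' ') ∧ pvOk (some c) cs

-- last char emitted after s, starting from p
def pvLastO : Option Char → List Char → Option Char
  | p, [] => p
  | _, c :: cs => pvLastO (some c) cs

-- reference form of result.split('. ')
def pvSplit : List Char → List (List Char)
  | '.' :: ' ' :: v => [] :: pvSplit v
  | c :: cs => List.modifyHead (c :: ·) (pvSplit cs)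
  | [] => [[]]

theorem pvSplit_ne_nil (s : List Char) : pvSplit s ≠ [] := by
  fun_induction pvSplit s <;> simp_all

theorem pvGo_eq (fuel : Nat) (l cur acc : _) (h : l.length < fuel) :
    PySem.Chars.splitOn.go ". ".toList fuel l cur acc =
      acc.reverse ++ List.modifyHead (cur.reverse ++ ·) (pvSplit l) := by
  induction fuel generalizing l cur acc with
  | zero => omega
  | succ fuel ih =>
    cases l with
    | nil => simp [PySem.Chars.splitOn.go, pvSplit]
    | cons c rest =>
      by_cases hp : (". ".toList).isPrefixOf (c :: rest)
      · obtain ⟨v, rfl, rfl⟩ : ∃ v, ' ' :: v = rest ∧ '.' = c := by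
          cases rest with
          | nil => simp [List.isPrefixOf] at hp
          | cons d t =>
            simp [List.isPrefixOf] at hp
            exact ⟨t, by rw [hp.2], hp.1⟩
        rw [show PySem.Chars.splitOn.go ". ".toList (fuel+1) ('.'::' '::v) cur acc =
              PySem.Chars.splitOn.go ". ".toList fuel v [] (cur.reverse :: acc) from by
          simp [PySem.Chars.splitOn.go, List.isPrefixOf]]
        rw [ih v [] (cur.reverse :: acc) (by simp at h ⊢; omega)]
        simp [pvSplit]
        cases hv : pvSplit v with
        | nil => exact absurd hv (pvSplit_ne_nil v)
        | cons a t => simp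
      · rw [show PySem.Chars.splitOn.go ". ".toList (fuel+1) (c::rest) cur acc =
              PySem.Chars.splitOn.go ". ".toList fuel rest (c :: cur) acc from by
          simp only [PySem.Chars.splitOn.go]; rw [if_neg (by simpa using hp)]]
        rw [ih rest (c :: cur) acc (by simp at h ⊢; omega)]
        rw [pvSplit.eq_2 c rest (by rintro v rfl rfl; exact hp (by simp [List.isPrefixOf]))]
        cases hv : pvSplit rest with
        | nil => exact absurd hv (pvSplit_ne_nil rest)
        | cons a t => simp

theorem pvSplitOn_eq (s : List Char) : PySem.Chars.splitOn s ". ".toList = pvSplit s := by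
  rw [PySem.Chars.splitOn, pvGo_eq (s.length+1) s [] [] (by omega)]
  cases hv : pvSplit s with
  | nil => exact absurd hv (pvSplit_ne_nil s)
  | cons a t => simp

theorem pvEmit_append (st : _) (a b : List Char) :
    pvEmit st (a ++ b) = pvEmit (pvEmit st a) b := by
  induction a generalizing st with
  | nil => rfl
  | cons c cs ih =>
    obtain ⟨out, cap, last⟩ := st
    simp only [List.cons_append, pvEmit]
    split <;> split <;> exact ih _

theorem pvEmit_out (out : List Char) (cap : Bool) (p : Option Char) (s : List Char) :
    pvEmit (out, cap, p) s = (out ++ (pvEmit ([], cap, p) s).1, (pvEmit ([], cap, p) s).2) := by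
  induction s generalizing out cap p with
  | nil => simp [pvEmit]
  | cons c cs ih =>
    simp only [pvEmit]
    split <;> split <;> (rw [ih (out ++ _), ih ([] ++ _)]; simp)

theorem pvEmit_false (out : List Char) (p : Option Char) (s : List Char) (h : pvOk p s) :
    pvEmit (out, false, p) s = (out ++ s, false, pvLastO p s) := by
  induction s generalizing out p with
  | nil => simp [pvEmit, pvLastO]
  | cons c cs ih =>
    obtain ⟨h1, h2⟩ := h
    simp only [pvEmit, if_neg h1]
    rw [show (pvLastO p (c :: cs)) = pvLastO (some c) cs from rfl]
    simpa using ih (out ++ [c]) (some c) h2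

theorem pvEmit_true (out : List Char) (p : Option Char) (s : List Char) (h : pvOk p s) :
    pvEmit (out, true, p) s =
      (out ++ pvCapF s, !s.any PySem.Chars.isalpha, pvLastO p s) := by
  induction s generalizing out p with
  | nil => simp [pvEmit, pvCapF, pvLastO]
  | cons c cs ih =>
    obtain ⟨h1, h2⟩ := h
    simp only [pvEmit, if_neg h1]
    by_cases ha : PySem.Chars.isalpha c
    · rw [if_pos (by simp [ha])]
      rw [pvEmit_false _ _ _ h2]
      simp [pvCapF, ha, pvLastO, List.any_cons]
    · rw [if_neg (by simp [ha])]
      rw [ih (out ++ [c]) (some c) h2]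
      simp [pvCapF, ha, pvLastO, List.any_cons]

theorem pvEmit_last_irrel (out : List Char) (cap : Bool) (p : Option Char)
    (hp : p ≠ some '.') (s : List Char) :
    (pvEmit (out, cap, p) s).1 = (pvEmit (out, cap, none) s).1 := by
  cases s with
  | nil => rfl
  | cons c cs =>
    simp only [pvEmit]
    rw [if_neg (show ¬(p = some '.' ∧ c = ' ') from fun h => hp h.1),
        if_neg (show ¬((none : Option Char) = some '.' ∧ c = ' ') from fun h => by simp at h)]

theorem pvOk_shift (cs : List Char) (c : Char) (hok : pvOk none cs)
    (h : ¬(c = '.' ∧ cs.head? = some ' ')) : pvOk (some c) cs := by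
  cases cs with
  | nil => trivial
  | cons d t =>
    exact ⟨fun hh => h ⟨by simpa using hh.1, by simp [hh.2]⟩, hok.2⟩

theorem pvSplit_cases (s : List Char) :
    (pvOk none s ∧ pvSplit s = [s]) ∨
    (∃ u v, s = u ++ '.' :: ' ' :: v ∧ pvOk none (u ++ ['.']) ∧ pvSplit s = u :: pvSplit v) := by
  induction s with
  | nil => exact Or.inl ⟨trivial, rfl⟩
  | cons c cs ih =>
    by_cases hpair : c = '.' ∧ cs.head? = some ' '
    · obtain ⟨rfl, hh⟩ := hpair
      cases cs with
      | nil => simp at hh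
      | cons d t =>
        simp at hh; subst hh
        exact Or.inr ⟨[], t, rfl, ⟨by simp, trivial⟩, rfl⟩
    · have hsp : pvSplit (c :: cs) = List.modifyHead (c :: ·) (pvSplit cs) := by
        apply pvSplit.eq_2
        rintro v rfl rfl; exact hpair ⟨rfl, rfl⟩
      have hjunction : ¬((none : Option Char) = some '.' ∧ c = ' ') := fun h => by simp at h
      rcases ih with ⟨hok, hsp'⟩ | ⟨u, v, rfl, hoku, hsp'⟩
      · refine Or.inl ⟨⟨hjunction, ?_⟩, by rw [hsp, hsp']; rfl⟩
        exact pvOk_shift cs c hok hpair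
      · refine Or.inr ⟨c :: u, v, rfl, ⟨hjunction, ?_⟩, by rw [hsp, hsp']; rfl⟩
        apply pvOk_shift _ _ hoku
        intro hh
        apply hpair
        refine ⟨hh.1, ?_⟩
        cases u with
        | nil => simpa using hh.2
        | cons a b => simpa using hh.2

theorem pvCapF_append_nonalpha (u : List Char) (d : Char) (hd : ¬PySem.Chars.isalpha d) :
    pvCapF (u ++ [d]) = pvCapF u ++ [d] := by
  induction u with
  | nil => simp [pvCapF, hd]
  | cons c cs ih =>
    by_cases h : PySem.Chars.isalpha c <;> simp [pvCapF, h, ih]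

theorem pvLastO_append_single (p : Option Char) (u : List Char) (d : Char) :
    pvLastO p (u ++ [d]) = some d := by
  induction u generalizing p with
  | nil => rfl
  | cons c cs ih => exact ih (some c)

theorem pvStream_eq_capA_aux (n : Nat) :
    ∀ s : List Char, s.length ≤ n →
      (pvEmit ([], true, none) s).1 =
        PySem.Chars.join ". ".toList ((pvSplit s).map pvCapF) := by
  induction n with
  | zero =>
    intro s hs
    have : s = [] := by cases s <;> simp_all
    subst this
    simp [pvEmit, pvSplit, pvCapF, PySem.Chars.join_singleton]
  | succ n ihn =>
    intro s hs
    rcases pvSplit_cases s with ⟨hok, hsp⟩ | ⟨u, v, rfl, hoku, hsp⟩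
    · rw [pvEmit_true [] none s hok, hsp]
      simp [PySem.Chars.join_singleton]
    · have hre : u ++ '.' :: ' ' :: v = (u ++ ['.']) ++ [' '] ++ v := by simp
      rw [hre, pvEmit_append, pvEmit_append]
      rw [pvEmit_true [] none (u ++ ['.']) hoku]
      rw [pvCapF_append_nonalpha u '.' (by decide), pvLastO_append_single]
      have hstep : pvEmit ([] ++ (pvCapF u ++ ['.']), !(u ++ ['.']).any PySem.Chars.isalpha, some '.') [' ']
          = (pvCapF u ++ ['.'] ++ [' '], true, some ' ') := by
        simp [pvEmit]
        decide
      rw [hstep]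
      rw [pvEmit_out]
      rw [pvEmit_last_irrel _ _ _ (by simp) v]
      rw [ihn v (by simp at hs; omega)]
      rw [← hre, hsp]
      simp only [List.map_cons]
      cases hv : pvSplit v with
      | nil => exact absurd hv (pvSplit_ne_nil v)
      | cons a t =>
        simp only [List.map_cons]
        rw [PySem.Chars.join_cons_cons]
        simp

theorem pvStream_eq_capA (s : List Char) :
    (pvEmit ([], true, none) s).1 =
      PySem.Chars.join ". ".toList ((pvSplit s).map pvCapF) :=
  pvStream_eq_capA_aux s.length s le_rfl

theorem pvEnumerate_nil (k : Int) : PySem.List.enumerate ([] : List Char) k = [] := by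
  simp [PySem.List.enumerate]
theorem pvEnumerate_cons (c : Char) (t : List Char) (k : Int) :
    PySem.List.enumerate (c :: t) k = (k, c) :: PySem.List.enumerate t (k + 1) := by
  simp [PySem.List.enumerate]

theorem pvFA_none (s : List Char) (k : Int) (h : ∀ c ∈ s, ¬PySem.Chars.isalpha c) :
    pvFirstAlpha (PySem.List.enumerate s k) = none := by
  induction s generalizing k with
  | nil => simp [pvEnumerate_nil, pvFirstAlpha]
  | cons c t ih =>
    rw [pvEnumerate_cons]
    simp only [pvFirstAlpha]
    rw [if_neg (by simpa using h c (by simp))]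
    exact ih (k+1) (fun x hx => h x (by simp [hx]))

theorem pvFA_some (a : List Char) (c : Char) (b : List Char) (k : Int)
    (ha : ∀ x ∈ a, ¬PySem.Chars.isalpha x) (hc : PySem.Chars.isalpha c) :
    pvFirstAlpha (PySem.List.enumerate (a ++ c :: b) k) = some (k + a.length) := by
  induction a generalizing k with
  | nil => simp [pvEnumerate_cons, pvFirstAlpha, hc]
  | cons d t ih =>
    rw [List.cons_append, pvEnumerate_cons]
    simp only [pvFirstAlpha]
    rw [if_neg (by simpa using ha d (by simp))]
    rw [ih (k+1) (fun x hx => ha x (by simp [hx]))]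
    congr 1
    push_cast [List.length_cons]
    ring

theorem pvCapF_id (s : List Char) (h : ∀ c ∈ s, ¬PySem.Chars.isalpha c) : pvCapF s = s := by
  induction s with
  | nil => rfl
  | cons c t ih =>
    simp only [pvCapF]
    rw [if_neg (by simpa using h c (by simp))]
    rw [ih (fun x hx => h x (by simp [hx]))]

theorem pvCapF_decomp (a : List Char) (c : Char) (b : List Char)
    (ha : ∀ x ∈ a, ¬PySem.Chars.isalpha x) (hc : PySem.Chars.isalpha c) :
    pvCapF (a ++ c :: b) = a ++ PySem.Chars.upperChar c :: b := by
  induction a with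
  | nil => simp [pvCapF, hc]
  | cons d t ih =>
    simp only [List.cons_append, pvCapF]
    rw [if_neg (by simpa using ha d (by simp))]
    rw [ih (fun x hx => ha x (by simp [hx]))]

theorem pvAlpha_decomp (s : List Char) (h : s.any PySem.Chars.isalpha) :
    ∃ a c b, s = a ++ c :: b ∧ (∀ x ∈ a, ¬PySem.Chars.isalpha x) ∧ PySem.Chars.isalpha c := by
  induction s with
  | nil => simp at h
  | cons d t ih =>
    by_cases hd : PySem.Chars.isalpha d
    · exact ⟨[], d, t, rfl, by simp, hd⟩
    · have : t.any PySem.Chars.isalpha := by simpa [hd] using h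
      obtain ⟨a, c, b, rfl, ha, hc⟩ := ih this
      exact ⟨d :: a, c, b, rfl, by simpa [hd] using ha, hc⟩

theorem pvCapSent_eq (s : List Char) : pvCapSent s = pvCapF s := by
  cases hs : s with
  | nil => rfl
  | cons hd tl =>
    rw [← hs]
    by_cases hA : s.any PySem.Chars.isalpha
    · obtain ⟨a, c, b, rfl, ha, hc⟩ := pvAlpha_decomp s hA
      rw [pvCapSent, if_pos (by simp)]
      rw [pvFA_some a c b 0 ha hc]
      have h0 : ((0 : Int) + a.length) = ((a.length : Nat) : Int) := by ring
      rw [h0]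
      show PySem.List.slice (a ++ c :: b) none (some ((a.length : Nat) : Int)) ++
           (match PySem.List.pyGet? (a ++ c :: b) ((a.length : Nat) : Int) with
            | some c => [PySem.Chars.upperChar c] | none => []) ++
           PySem.List.slice (a ++ c :: b) (some (((a.length : Nat) : Int) + 1)) none = _
      rw [PySem.List.slice_to _ (by positivity)]
      rw [PySem.List.pyGet?_natCast]
      have hcast : (((a.length : Nat) : Int) + 1) = ((a.length + 1 : Nat) : Int) := by push_cast; ring
      rw [hcast, PySem.List.slice_from _ (by positivity)]
      rw [pvCapF_decomp a c b ha hc]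
      simp only [Int.toNat_natCast]
      have hget : (a ++ c :: b)[a.length]? = some c := by
        rw [List.getElem?_append_right (le_refl _)]
        simp
      rw [hget]
      have hdrop : List.drop (a.length + 1) (a ++ c :: b) = b := by
        have : a ++ c :: b = (a ++ [c]) ++ b := by simp
        rw [this, List.drop_left' (by simp)]
      rw [hdrop]
      simp [List.take_left']
    · have hall : ∀ c ∈ s, ¬PySem.Chars.isalpha c := by
        intro c hcs; by_contra hcc; exact hA (List.any_eq_true.2 ⟨c, hcs, by simpa using hcc⟩)
      rw [pvCapSent, if_pos (by simp [hs]), pvFA_none s 0 hall, pvCapF_id s hall]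

theorem pvCheck_enum (ws : List (List Char)) (k : Int) :
    pvCheck (PySem.List.enumerate ws k) = pvCheck' ws := by
  induction ws generalizing k with
  | nil => simp [PySem.List.enumerate, pvCheck, pvCheck']
  | cons w t ih =>
    show pvCheck (PySem.List.enumerate (w :: t) k) = _
    rw [show PySem.List.enumerate (w :: t) k = (k, w) :: PySem.List.enumerate t (k+1) from by
      simp [PySem.List.enumerate]]
    simp only [pvCheck, pvCheck']
    split_ifs <;> simp [ih]

theorem pvTok_acc (cs : List Char) (ws : List (List Char)) (cur : List Char) :
    pvTok cs ws cur = ws ++ pvTok cs [] cur := by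
  induction cs generalizing ws cur with
  | nil => simp only [pvTok]; split_ifs <;> simp
  | cons c t ih =>
    simp only [pvTok]
    split_ifs with h1 h2
    · exact ih ws (cur ++ [c])
    · rw [ih (ws ++ [cur] ++ [[c]]) [], ih ([] ++ [cur] ++ [[c]]) []]
      simp
    · rw [ih (ws ++ [[c]]) [], ih ([] ++ [[c]]) []]
      simp

theorem pvCheck'_append (xs ys : List (List Char)) :
    pvCheck' (xs ++ ys) =
      (match pvCheck' xs with
       | some c => some c
       | none => pvCheck' ys) := by
  induction xs with
  | nil => simp [pvCheck']
  | cons w t ih =>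
    simp only [List.cons_append, pvCheck']
    split_ifs <;> simp [ih]

theorem pvElig_single (c : Char) : pvElig [c] = false := by
  simp [pvElig]

theorem pvB_eq (cs : List Char) : ∀ (word : List Char) (st : _),
    pvB st word cs =
      (match pvCheck' (pvTok cs [] word) with
       | some comp => comp
       | none => (pvEmit st (((pvTok cs [] word).map pvRepl).flatten)).1) := by
  induction cs with
  | nil =>
    intro word st
    by_cases hw : word = []
    · subst hw
      simp [pvB, pvFlush, pvTok, pvCheck', pvEmit]
    · simp only [pvB, pvFlush, if_pos hw, pvTok, if_pos hw]
      simp only [List.nil_append]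
      by_cases he : pvElig word
      · by_cases hc : pvAcronyms.contains word
        · simp [he, hc, pvCheck', pvRepl]
        · simp [he, hc, pvCheck', pvRepl]
      · simp [he, pvCheck', pvRepl]
  | cons c t ih =>
    intro word st
    by_cases ha : PySem.Chars.isalnum c
    · simp only [pvB, if_pos ha, pvTok]
      rw [ih (word ++ [c]) st]
    · -- c is a separator
      have htok : ∀ w, pvTok (c :: t) [] w =
          (if w ≠ [] then [w] else []) ++ [[c]] ++ pvTok t [] [] := by
        intro w
        simp only [pvTok, if_neg ha]
        rw [pvTok_acc t _ []]
        split_ifs <;> simp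
      by_cases hw : word = []
      · subst hw
        rw [htok, if_neg (by simp)]
        simp only [pvB, if_neg ha]
        show pvB (pvEmit st [c]) [] t = _
        rw [ih [] (pvEmit st [c]), pvCheck'_append]
        simp only [List.nil_append, pvCheck', pvElig_single, Bool.false_eq_true, if_false]
        cases hchk : pvCheck' (pvTok t [] []) with
        | some comp => simp
        | none =>
          simp only [List.map_append, List.map_cons, List.map_nil, List.flatten_append,
                List.flatten_cons, List.flatten_nil, List.append_nil,
                show pvRepl [c] = [c] from by simp [pvRepl, pvElig_single]]
          rw [pvEmit_append]
      · rw [htok, if_pos hw]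
        by_cases he : pvElig word
        · by_cases hc : pvAcronyms.contains word
          · have hfl : pvFlush st word = Sum.inr (pvEmit st (pvAcronyms.getD word [])) := by
              simp [pvFlush, hw, he, hc]
            simp only [pvB, if_neg ha, hfl]
            rw [ih [] _, pvCheck'_append]
            simp only [List.cons_append, List.nil_append, pvCheck', pvElig_single,
              Bool.false_eq_true, if_false, if_pos he, if_pos hc]
            cases hchk : pvCheck' (pvTok t [] []) with
            | some comp => simp
            | none =>
              simp only [List.map_append, List.map_cons, List.map_nil, List.flatten_append,
                List.flatten_cons, List.flatten_nil, List.append_nil,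
                show pvRepl [c] = [c] from by simp [pvRepl, pvElig_single],
                show pvRepl word = pvAcronyms.getD word [] from by simp [pvRepl, he, hc]]
              rw [pvEmit_append, pvEmit_append]
          · have hfl : pvFlush st word = Sum.inl (pvComplaint word) := by
              simp [pvFlush, hw, he, hc]
            simp only [pvB, if_neg ha, hfl]
            rw [pvCheck'_append]
            simp [pvCheck', he, hc]
        · have hfl : pvFlush st word = Sum.inr (pvEmit st word) := by
            simp [pvFlush, hw, he]
          simp only [pvB, if_neg ha, hfl]
          rw [ih [] _, pvCheck'_append]
          simp only [List.cons_append, List.nil_append, pvCheck', pvElig_single,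
            Bool.false_eq_true, if_false, if_neg he]
          cases hchk : pvCheck' (pvTok t [] []) with
          | some comp => simp
          | none =>
            simp only [List.map_append, List.map_cons, List.map_nil, List.flatten_append,
                List.flatten_cons, List.flatten_nil, List.append_nil,
                show pvRepl [c] = [c] from by simp [pvRepl, pvElig_single],
              show pvRepl word = word from by simp [pvRepl, he]]
            rw [pvEmit_append, pvEmit_append]

theorem pvJoin_nil_flatten (ps : List (List Char)) : PySem.Chars.join [] ps = ps.flatten := by
  induction ps with
  | nil => simp [PySem.Chars.join_nil]
  | cons p rest ih =>
    cases rest with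
    | nil => simp [PySem.Chars.join_singleton]
    | cons q t => rw [PySem.Chars.join_cons_cons]; simp_all

-- ===== VERDICT (by name: the statement is the Claim_ definition above) =====
theorem acronym_buster_spec : Claim_equal_acronym_buster := by
  intro text _
  show acronym_buster text = acronym_buster_alt text
  unfold acronym_buster acronym_buster_alt
  congr 1
  rw [pvB_eq]
  unfold pvA
  rw [pvCheck_enum]
  cases hchk : pvCheck' (pvTok text.toList [] []) with
  | some comp => rfl
  | none =>
    simp only []
    rw [show (fun w => if pvElig w && pvAcronyms.contains w then pvAcronyms.getD w [] else w) = pvRepl from rfl]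
    rw [pvJoin_nil_flatten, pvSplitOn_eq]
    rw [show pvCapSent = pvCapF from funext pvCapSent_eq]
    rw [← pvStream_eq_capA]
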